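-- pv_equiv track=rewrite | github.com/Stjoo0925/CodingTest | 프로그래머스/0/181926. 수 조작하기 1/수 조작하기 1.py | solution
-- ===== SOURCE A (Python) =====
-- def solution(n, control):
--     arr = list(control)
--     for i in arr:
--         if i == "w":
--             n = n + 1
--         elif i == "s":
--             n = n - 1
--         elif i == "d":
--             n = n + 10
--         else:
--             n = n - 10
--     return n
-- ===== SOURCE B (Python) =====
-- def solution(n, control):
--     w = control.count("w")
--     s = control.count("s")
--     d = control.count("d")
--     return n + w - s + 10 * d - 10 * (len(control) - w - s - d)
-- ===== Notes on version B (the rewrite author's own statement) =====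
-- stated objective: simpler
-- what changed: Replaces the sequential per-character accumulation with a closed-form arithmetic expression over character counts (w/s/d via str.count, every other character folded into the -10 remainder term).
import Mathlib
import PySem

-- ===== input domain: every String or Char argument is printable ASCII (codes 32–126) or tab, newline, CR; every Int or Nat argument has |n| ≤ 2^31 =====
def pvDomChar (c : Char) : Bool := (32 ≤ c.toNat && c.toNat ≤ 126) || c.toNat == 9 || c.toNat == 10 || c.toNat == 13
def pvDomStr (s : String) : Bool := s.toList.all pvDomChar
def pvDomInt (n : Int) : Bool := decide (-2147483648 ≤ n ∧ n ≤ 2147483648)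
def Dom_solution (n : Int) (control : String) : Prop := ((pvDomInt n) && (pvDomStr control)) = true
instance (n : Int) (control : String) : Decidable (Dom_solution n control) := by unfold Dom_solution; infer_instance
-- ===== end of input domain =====

-- B replaces A's sequential accumulation with a closed-form sum over character counts (objective: simpler).

-- ===== PORT A =====
def solution (n : Int) (control : String) : Int :=
  control.toList.foldl (fun n i =>
    if i == 'w' then n + 1
    else if i == 's' then n - 1
    else if i == 'd' then n + 10
    else n - 10) n

-- ===== PORT B =====
def solution_alt (n : Int) (control : String) : Int :=
  let w : Int := PySem.Str.count control "w"
  let s : Int := PySem.Str.count control "s"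
  let d : Int := PySem.Str.count control "d"
  n + w - s + 10 * d - 10 * (PySem.Str.len control - w - s - d)

-- ===== PRECONDITION & SPEC =====
def Spec_solution (n : Int) (control : String) (out : Int) : Prop := out = solution_alt n control
instance (n : Int) (control : String) (out : Int) : Decidable (Spec_solution n control out) := by unfold Spec_solution; infer_instance

-- ===== CLAIM (what is proved, stated in full; the proofs are below) =====
def Claim_equal_solution : Prop := ∀ (n : Int) (control : String), Dom_solution n control → Spec_solution n control (solution n control)

-- ===== LEMMAS AND PROOFS =====

-- Python's s.count(c) for a one-character pattern is the plain character count.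
theorem chars_count_go_singleton (c : Char) (l : List Char) :
    ∀ (fuel acc : Nat), l.length ≤ fuel →
      PySem.Chars.count.go [c] fuel l acc = acc + l.count c := by
  induction l with
  | nil =>
    intro fuel acc _
    cases fuel <;> simp [PySem.Chars.count.go]
  | cons h t ih =>
    intro fuel acc hle
    cases fuel with
    | zero => simp at hle
    | succ f =>
      simp only [List.length_cons, Nat.succ_le_succ_iff] at hle
      by_cases hc : h = c
      · subst hc
        simp [PySem.Chars.count.go, ih f (acc + 1) hle]
        omega
      · have hpre : ([c].isPrefixOf (h :: t)) = false := by
          simp [List.isPrefixOf]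
          exact fun e => hc e.symm
        simp [PySem.Chars.count.go, hpre, ih f acc hle, hc]

theorem chars_count_singleton (c : Char) (l : List Char) :
    PySem.Chars.count l [c] = l.count c := by
  simp [PySem.Chars.count, chars_count_go_singleton c l l.length 0 le_rfl]

theorem foldl_closed_form (l : List Char) (n : Int) :
    l.foldl (fun n i =>
      if i == 'w' then n + 1
      else if i == 's' then n - 1
      else if i == 'd' then n + 10
      else n - 10) n
    = n + l.count 'w' - l.count 's' + 10 * l.count 'd'
      - 10 * ((l.length : Int) - l.count 'w' - l.count 's' - l.count 'd') := by
  induction l generalizing n with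
  | nil => simp
  | cons h t ih =>
    simp only [List.foldl_cons, List.count_cons, List.length_cons, ih]
    split_ifs with h1 h2 h3 <;>
      simp_all [beq_iff_eq] <;> ring

-- ===== VERDICT (by name: the statement is the Claim_ definition above) =====
theorem solution_spec : Claim_equal_solution := by
  intro n control _
  unfold Spec_solution solution solution_alt
  rw [foldl_closed_form]
  simp only [PySem.Str.count, PySem.Str.len_eq]
  rw [show ("w" : String).toList = ['w'] from rfl,
      show ("s" : String).toList = ['s'] from rfl,
      show ("d" : String).toList = ['d'] from rfl]
  simp only [chars_count_singleton, String.length_toList]
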